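-- pv_equiv track=rewrite | github.com/priba/nmp_qc | GraphReader/graph_reader.py | create_numeric_classes
-- ===== SOURCE A (Python) =====
-- def create_numeric_classes(train_classes, valid_classes, test_classes):
--
--     classes = train_classes + valid_classes + test_classes
--     uniq_classes = sorted(list(set(classes)))
--     train_classes_ = [0] * len(train_classes)
--     valid_classes_ = [0] * len(valid_classes)
--     test_classes_ = [0] * len(test_classes)
--     for ix in range(len(uniq_classes)):
--         idx = [i for i, c in enumerate(train_classes) if c == uniq_classes[ix]]
--         for i in idx:
--             train_classes_[i] = ix
--         idx = [i for i, c in enumerate(valid_classes) if c == uniq_classes[ix]]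
--         for i in idx:
--             valid_classes_[i] = ix
--         idx = [i for i, c in enumerate(test_classes) if c == uniq_classes[ix]]
--         for i in idx:
--             test_classes_[i] = ix
--
--     return train_classes_, valid_classes_, test_classes_
-- ===== SOURCE B (Python) =====
-- def create_numeric_classes(train_classes, valid_classes, test_classes):
--     uniq = sorted(set(train_classes + valid_classes + test_classes))
--     index = {c: i for i, c in enumerate(uniq)}
--     train_classes_ = [index[c] for c in train_classes]
--     valid_classes_ = [index[c] for c in valid_classes]
--     test_classes_ = [index[c] for c in test_classes]
--     return train_classes_, valid_classes_, test_classes_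
-- ===== Notes on version B (the rewrite author's own statement) =====
-- stated objective: faster
-- what changed: Replaces A's per-unique-class rescan of all three lists (for each unique class, filter every list for matching indices and write them) with one dict built from the sorted unique classes followed by a single lookup pass over each list.
import Mathlib
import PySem

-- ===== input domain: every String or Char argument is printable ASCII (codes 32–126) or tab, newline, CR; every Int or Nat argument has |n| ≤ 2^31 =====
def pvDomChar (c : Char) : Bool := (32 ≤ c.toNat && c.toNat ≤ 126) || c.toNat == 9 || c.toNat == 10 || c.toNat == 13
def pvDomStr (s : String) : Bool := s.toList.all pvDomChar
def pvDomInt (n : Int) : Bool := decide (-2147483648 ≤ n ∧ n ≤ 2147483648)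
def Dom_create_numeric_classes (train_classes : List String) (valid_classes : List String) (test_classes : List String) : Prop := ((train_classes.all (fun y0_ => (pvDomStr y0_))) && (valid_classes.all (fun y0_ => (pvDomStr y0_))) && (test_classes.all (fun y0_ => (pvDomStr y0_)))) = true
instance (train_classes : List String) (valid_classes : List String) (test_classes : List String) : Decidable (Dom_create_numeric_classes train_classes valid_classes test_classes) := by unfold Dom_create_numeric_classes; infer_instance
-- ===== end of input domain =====

-- B replaces A's per-unique-class rescan of all three lists with one index dict and a single lookup pass per list (objective: faster).

-- ===== PORT A =====
-- inner body of A's loop for one list: idx = [i for i, c in enumerate(cls) if c == u]; for i in idx: acc[i] = ix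
def pvAssignA (cls : List String) (u : String) (ix : Int) (acc : List Int) : List Int :=
  let idx := ((PySem.List.enumerate cls 0).filter (fun p => p.2 == u)).map (·.1)
  idx.foldl (fun a i => PySem.List.pySetD a i ix) acc

def create_numeric_classes (train_classes : List String) (valid_classes : List String) (test_classes : List String) : List Int × List Int × List Int :=
  let classes := train_classes ++ valid_classes ++ test_classes
  let uniq_classes := PySem.List.sorted (PySem.Set.ofList classes) (fun x => x) false
  let train0 : List Int := List.replicate train_classes.length 0
  let valid0 : List Int := List.replicate valid_classes.length 0
  let test0 : List Int := List.replicate test_classes.length 0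
  (PySem.List.pyRange 0 uniq_classes.length 1).foldl
    (fun (s : List Int × List Int × List Int) ix =>
      let u := PySem.List.pyGetD uniq_classes ix ""
      (pvAssignA train_classes u ix s.1,
       pvAssignA valid_classes u ix s.2.1,
       pvAssignA test_classes u ix s.2.2))
    (train0, valid0, test0)

-- ===== PORT B =====
def create_numeric_classes_alt (train_classes : List String) (valid_classes : List String) (test_classes : List String) : List Int × List Int × List Int :=
  let uniq := PySem.List.sorted (PySem.Set.ofList (train_classes ++ valid_classes ++ test_classes)) (fun x => x) false
  let index := (PySem.List.enumerate uniq 0).foldl (fun d p => d.insert p.2 p.1) (PySem.Dict.empty : PySem.Dict String Int)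
  (train_classes.map (fun c => index.getD c 0),
   valid_classes.map (fun c => index.getD c 0),
   test_classes.map (fun c => index.getD c 0))

-- ===== PRECONDITION & SPEC =====
def Spec_create_numeric_classes (train_classes : List String) (valid_classes : List String) (test_classes : List String) (out : List Int × List Int × List Int) : Prop := out = create_numeric_classes_alt train_classes valid_classes test_classes
instance (train_classes : List String) (valid_classes : List String) (test_classes : List String) (out : List Int × List Int × List Int) : Decidable (Spec_create_numeric_classes train_classes valid_classes test_classes out) := by unfold Spec_create_numeric_classes; infer_instance

-- ===== CLAIM (what is proved, stated in full; the proofs are below) =====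
def Claim_equal_create_numeric_classes : Prop := ∀ (train_classes : List String) (valid_classes : List String) (test_classes : List String), Dom_create_numeric_classes train_classes valid_classes test_classes → Spec_create_numeric_classes train_classes valid_classes test_classes (create_numeric_classes train_classes valid_classes test_classes)

-- ===== LEMMAS AND PROOFS =====

-- the common value both programs assign to a class c: its position in uniq (0 if absent, which never shows)
def pvTgt (uniq : List String) (c : String) : Int :=
  match PySem.List.index? uniq c with
  | some j => (j : Int)
  | none => 0

theorem pv_length_foldl_set (ix : Int) :
    ∀ (ps : List Int) (acc : List Int),
      (ps.foldl (fun a i => PySem.List.pySetD a i ix) acc).length = acc.length := by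
  intro ps
  induction ps with
  | nil => intro acc; rfl
  | cons p ps ih =>
      intro acc
      simp [List.foldl_cons, ih, PySem.List.length_pySetD]

theorem pv_length_assign (cls : List String) (u : String) (ix : Int) (acc : List Int) :
    (pvAssignA cls u ix acc).length = acc.length := by
  unfold pvAssignA
  exact pv_length_foldl_set ix _ acc

theorem pv_getElem?_foldl_set (ix : Int) :
    ∀ (ps : List Int) (acc : List Int) (i : Nat), (∀ p ∈ ps, 0 ≤ p) →
      (ps.foldl (fun a j => PySem.List.pySetD a j ix) acc)[i]? =
        if (i : Int) ∈ ps ∧ i < acc.length then some ix else acc[i]? := by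
  intro ps
  induction ps with
  | nil => intro acc i _; simp
  | cons p ps ih =>
      intro acc i hpos
      have hp : 0 ≤ p := hpos p (List.mem_cons_self ..)
      rw [List.foldl_cons, ih _ _ (fun q hq => hpos q (List.mem_cons_of_mem _ hq))]
      rw [PySem.List.pySetD_of_nonneg _ _ hp]
      by_cases hmem : (i : Int) ∈ ps
      · simp only [hmem, List.mem_cons, or_true, true_and, List.length_set]
        split_ifs with hl
        · rfl
        · rw [List.getElem?_eq_none_iff.2 (by rw [List.length_set]; omega),
              List.getElem?_eq_none_iff.2 (by omega)]
      · simp only [hmem, false_and, if_false, List.mem_cons]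
        by_cases heq : (i : Int) = p
        · have : i = p.toNat := by omega
          subst this
          by_cases hlt : p.toNat < acc.length
          · simp [heq, hlt, List.getElem?_set_self, hlt]
          · have h1 : (acc.set p.toNat ix)[p.toNat]? = none := by
              simp [List.getElem?_eq_none_iff, List.length_set]; omega
            have h2 : acc[p.toNat]? = none := by
              simp [List.getElem?_eq_none_iff]; omega
            simp [heq, hlt, hmem, h1, h2]
        · have hne : i ≠ p.toNat := by omega
          simp [heq, hmem, List.getElem?_set_ne (by omega : p.toNat ≠ i)]

theorem pv_mem_idx (cls : List String) (u : String) (i : Nat) :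
    ((i : Int) ∈ ((PySem.List.enumerate cls 0).filter (fun p => p.2 == u)).map (·.1)) ↔
      cls[i]? = some u := by
  simp only [List.mem_map, List.mem_filter, PySem.List.mem_enumerate_iff]
  constructor
  · rintro ⟨⟨a, b⟩, ⟨⟨k, hk, hpk⟩, hbu⟩, hai⟩
    obtain ⟨h1, h2⟩ := Prod.mk.injEq .. ▸ hpk
    simp only at hai hbu
    have : k = i := by omega
    subst this
    simp_all [List.getElem?_eq_getElem hk]
  · intro h
    have hi : i < cls.length := by
      by_contra hc
      rw [List.getElem?_eq_none_iff.2 (by omega)] at h; simp at h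
    refine ⟨((i : Int), cls[i]), ⟨⟨i, hi, by simp⟩, ?_⟩, rfl⟩
    have : cls[i] = u := by
      have := List.getElem?_eq_getElem hi ▸ h; exact Option.some.injEq .. ▸ this
    simp [this]

theorem pv_assign_getElem? (cls : List String) (u : String) (ix : Int) (acc : List Int)
    (hlen : acc.length = cls.length) (i : Nat) :
    (pvAssignA cls u ix acc)[i]? = if cls[i]? = some u then some ix else acc[i]? := by
  unfold pvAssignA
  rw [pv_getElem?_foldl_set]
  · by_cases h : cls[i]? = some u
    · have hi : i < cls.length := by
        by_contra hc
        rw [List.getElem?_eq_none_iff.2 (by omega)] at h; simp at h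
      rw [if_pos ⟨(pv_mem_idx cls u i).2 h, by omega⟩, if_pos h]
    · rw [if_neg, if_neg h]
      rintro ⟨hm, _⟩
      exact h ((pv_mem_idx cls u i).1 hm)
  · intro p hp
    simp only [List.mem_map, List.mem_filter, PySem.List.mem_enumerate_iff] at hp
    obtain ⟨⟨a, b⟩, ⟨⟨k, hk, hpk⟩, _⟩, hai⟩ := hp
    obtain ⟨h1, _⟩ := Prod.mk.injEq .. ▸ hpk
    simp only at hai
    omega

-- nodup list: the index of its k-th element is k
theorem pv_index?_getElem (uniq : List String) (hnd : uniq.Nodup) (k : Nat) (hk : k < uniq.length) :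
    PySem.List.index? uniq uniq[k] = some k := by
  rw [PySem.List.index?_eq_some_iff]
  refine ⟨uniq.take k, uniq.drop (k + 1), ?_, by simp [List.length_take]; omega, ?_⟩
  · rw [List.getElem_cons_drop, List.take_append_drop]
  · intro hmem
    obtain ⟨j, hj, hje⟩ := List.mem_iff_getElem.1 hmem
    rw [List.length_take] at hj
    have hjlen : j < uniq.length := by omega
    rw [List.getElem_take] at hje
    have hjk : j < k := by omega
    exact (List.Nodup.getElem_inj_iff hnd).1 hje |> (by omega : j ≠ k)

-- A's outer loop, restricted to one list
theorem pv_loopA (cls uniq : List String) (hnd : uniq.Nodup) :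
    ∀ (k : Nat), k ≤ uniq.length →
      ∀ (i : Nat),
      ((List.range k).foldl
        (fun acc (j : Nat) => pvAssignA cls (PySem.List.pyGetD uniq (j : Int) "") (j : Int) acc)
        (List.replicate cls.length (0 : Int)))[i]? =
      cls[i]?.map (fun c =>
        match PySem.List.index? uniq c with
        | some j => if j < k then (j : Int) else 0
        | none => 0) := by
  intro k
  induction k with
  | zero =>
      intro _ i
      by_cases hi : i < cls.length
      · have h0 : (List.replicate cls.length (0 : Int))[i]? = some 0 := by simp [hi]
        rw [List.range_zero, List.foldl_nil, h0, List.getElem?_eq_getElem hi]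
        simp only [Option.map_some, Option.some.injEq, Nat.not_lt_zero, if_false]
        split <;> simp
      · rw [List.getElem?_eq_none_iff.2 (by simpa using (by omega : cls.length ≤ i)),
            List.getElem?_eq_none_iff.2 (by omega)]
        simp
  | succ k ih =>
      intro hk i
      have hklen : k < uniq.length := by omega
      rw [List.range_succ, List.foldl_append, List.foldl_cons, List.foldl_nil]
      have hlen : ∀ (m : Nat), ((List.range m).foldl
          (fun acc (j : Nat) => pvAssignA cls (PySem.List.pyGetD uniq (j : Int) "") (j : Int) acc)
          (List.replicate cls.length (0 : Int))).length = cls.length := by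
        intro m
        induction m with
        | zero => simp
        | succ m ihm =>
            rw [List.range_succ, List.foldl_append, List.foldl_cons, List.foldl_nil,
                pv_length_assign, ihm]
      rw [pv_assign_getElem? _ _ _ _ (hlen k), ih (by omega)]
      have hget : PySem.List.pyGetD uniq (k : Int) "" = uniq[k] := by
        rw [PySem.List.pyGetD_eq_getElem _ _ (by omega) (by exact_mod_cast hklen)]
        simp
      rw [hget]
      by_cases hcase : cls[i]? = some uniq[k]
      · rw [hcase]
        simp only [Option.map_some, if_true]
        rw [pv_index?_getElem uniq hnd k hklen]
        simp
      · rw [if_neg hcase]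
        by_cases hi : i < cls.length
        · rw [List.getElem?_eq_getElem hi] at hcase ⊢
          simp only [Option.map_some, Option.some.injEq]
          cases hidx : PySem.List.index? uniq cls[i] with
          | none => rfl
          | some j =>
              have hjk : j ≠ k := by
                intro hjke
                subst hjke
                obtain ⟨hjl, hje, _⟩ := PySem.List.getElem_of_index?_eq_some hidx
                exact hcase (by rw [hje])
              simp only
              by_cases hjlt : j < k
              · rw [if_pos hjlt, if_pos (by omega)]
              · rw [if_neg hjlt, if_neg (by omega)]
        · rw [List.getElem?_eq_none_iff.2 (by omega)]; simp

-- B's dict, looked up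
theorem pv_dict_get? (uniq : List String) (hnd : uniq.Nodup) (c : String) :
    ∀ (s : Int) (d : PySem.Dict String Int),
      ((PySem.List.enumerate uniq s).foldl (fun d p => d.insert p.2 p.1) d).get? c =
        match PySem.List.index? uniq c with
        | some j => some (s + (j : Int))
        | none => d.get? c := by
  induction uniq with
  | nil => intro s d; simp [PySem.List.enumerate_nil, PySem.List.index?]
  | cons u rest ih =>
      intro s d
      rw [PySem.List.enumerate_cons, List.foldl_cons]
      have hnd' : rest.Nodup := (List.nodup_cons.1 hnd).2
      rw [ih hnd' (s + 1) (d.insert u s)]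
      by_cases hc : c = u
      · subst hc
        have hnm : c ∉ rest := (List.nodup_cons.1 hnd).1
        rw [PySem.List.index?_cons_self]
        rw [(PySem.List.index?_eq_none_iff _ _).2 hnm]
        simp [PySem.Dict.get?_insert_self]
      · rw [PySem.List.index?_cons_of_ne _ (fun h => hc h.symm)]
        cases hidx : PySem.List.index? rest c with
        | none => simp [PySem.Dict.get?_insert_of_ne _ _ hc]
        | some j =>
            simp only [Option.map_some]
            congr 1
            push_cast
            ring

theorem pv_map_eq (cls uniq : List String) (hnd : uniq.Nodup) :
    cls.map (fun c =>
      (((PySem.List.enumerate uniq 0).foldl (fun d p => d.insert p.2 p.1)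
         (PySem.Dict.empty : PySem.Dict String Int)).getD c 0)) =
    cls.map (pvTgt uniq) := by
  apply List.map_congr_left
  intro c _
  rw [PySem.Dict.getD_eq_get?_getD, pv_dict_get? uniq hnd c 0 PySem.Dict.empty]
  unfold pvTgt
  cases PySem.List.index? uniq c with
  | none => simp [PySem.Dict.get?_empty]
  | some j => simp

theorem pv_loopA_full (cls uniq : List String) (hnd : uniq.Nodup) :
    ((List.range uniq.length).foldl
      (fun acc (j : Nat) => pvAssignA cls (PySem.List.pyGetD uniq (j : Int) "") (j : Int) acc)
      (List.replicate cls.length (0 : Int))) = cls.map (pvTgt uniq) := by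
  apply List.ext_getElem?
  intro i
  rw [pv_loopA cls uniq hnd uniq.length le_rfl i, List.getElem?_map]
  cases cls[i]? with
  | none => rfl
  | some c =>
      simp only [Option.map_some, Option.some.injEq]
      unfold pvTgt
      cases hidx : PySem.List.index? uniq c with
      | none => rfl
      | some j =>
          obtain ⟨hjl, _, _⟩ := PySem.List.getElem_of_index?_eq_some hidx
          simp [hjl]

theorem pv_main (train_classes valid_classes test_classes : List String) :
    create_numeric_classes train_classes valid_classes test_classes =
    create_numeric_classes_alt train_classes valid_classes test_classes := by
  unfold create_numeric_classes create_numeric_classes_alt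
  set uniq := PySem.List.sorted
      (PySem.Set.ofList (train_classes ++ valid_classes ++ test_classes)) (fun x => x) false with huniq
  have hnd : uniq.Nodup := by
    rw [huniq]
    exact (PySem.List.sorted_perm ..).nodup_iff.2 (PySem.Set.nodup_ofList _)
  simp only
  -- split the triple-state fold into three independent folds
  have hsplit : ∀ (l : List Int) (a b c : List Int),
      (l.foldl (fun (s : List Int × List Int × List Int) ix =>
        let u := PySem.List.pyGetD uniq ix ""
        (pvAssignA train_classes u ix s.1,
         pvAssignA valid_classes u ix s.2.1,
         pvAssignA test_classes u ix s.2.2)) (a, b, c)) =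
      (l.foldl (fun s ix => pvAssignA train_classes (PySem.List.pyGetD uniq ix "") ix s) a,
       l.foldl (fun s ix => pvAssignA valid_classes (PySem.List.pyGetD uniq ix "") ix s) b,
       l.foldl (fun s ix => pvAssignA test_classes (PySem.List.pyGetD uniq ix "") ix s) c) := by
    intro l
    induction l with
    | nil => intro a b c; rfl
    | cons x xs ihl => intro a b c; simp only [List.foldl_cons]; exact ihl _ _ _
  rw [hsplit]
  -- pyRange 0 n 1 as List.range n
  have hrange : ∀ (cls : List String),
      ((PySem.List.pyRange 0 (uniq.length : Int) 1).foldl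
        (fun s ix => pvAssignA cls (PySem.List.pyGetD uniq ix "") ix s)
        (List.replicate cls.length (0 : Int))) =
      ((List.range uniq.length).foldl
        (fun acc (j : Nat) => pvAssignA cls (PySem.List.pyGetD uniq (j : Int) "") (j : Int) acc)
        (List.replicate cls.length (0 : Int))) := by
    intro cls
    rw [PySem.List.pyRange_one, List.foldl_map]
    simp
  rw [hrange, hrange, hrange,
      pv_loopA_full _ _ hnd, pv_loopA_full _ _ hnd, pv_loopA_full _ _ hnd,
      pv_map_eq _ _ hnd, pv_map_eq _ _ hnd, pv_map_eq _ _ hnd]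

-- ===== VERDICT (by name: the statement is the Claim_ definition above) =====
theorem create_numeric_classes_spec : Claim_equal_create_numeric_classes := by
  intro tr va te _
  unfold Spec_create_numeric_classes
  exact pv_main tr va te
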